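-- pv_equiv track=rewrite | github.com/jafrri/Data-Structures-and-Algorithms---Labs | DSA Lab 05.py | binary_search_iterative_modified
-- ===== SOURCE A (Python) =====
-- def binary_search_iterative_modified(lst,item):
--     start = 0
--     end = len(lst)
--     while start < end:
--         mid = (start + end) // 2
--         if int(lst[mid]) == item:
--             return(mid)
--         elif int(lst[mid]) > item:
--             end = mid
--         else:
--             start = mid + 1
--     lst.insert(end,item)
--     return(end)
-- ===== SOURCE B (Python) =====
-- def binary_search_iterative_modified(lst, item):
--     # Divide-and-conquer on sublists: returns (relative index, found).
--     def search(sub):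
--         if not sub:
--             return 0, False
--         m = len(sub) // 2
--         v = int(sub[m])
--         if v == item:
--             return m, True
--         if v > item:
--             return search(sub[:m])
--         i, f = search(sub[m+1:])
--         return m + 1 + i, f
--     idx, found = search(lst)
--     if not found:
--         lst.insert(idx, item)
--     return idx
-- ===== Notes on version B (the rewrite author's own statement) =====
-- stated objective: alternative
-- what changed: Replaces the iterative two-index while loop with a recursive divide-and-conquer on sublists (slicing around the probed midpoint and adding back the offset), with an explicit found flag instead of A's in-loop return/fall-through insert.
import Mathlib
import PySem

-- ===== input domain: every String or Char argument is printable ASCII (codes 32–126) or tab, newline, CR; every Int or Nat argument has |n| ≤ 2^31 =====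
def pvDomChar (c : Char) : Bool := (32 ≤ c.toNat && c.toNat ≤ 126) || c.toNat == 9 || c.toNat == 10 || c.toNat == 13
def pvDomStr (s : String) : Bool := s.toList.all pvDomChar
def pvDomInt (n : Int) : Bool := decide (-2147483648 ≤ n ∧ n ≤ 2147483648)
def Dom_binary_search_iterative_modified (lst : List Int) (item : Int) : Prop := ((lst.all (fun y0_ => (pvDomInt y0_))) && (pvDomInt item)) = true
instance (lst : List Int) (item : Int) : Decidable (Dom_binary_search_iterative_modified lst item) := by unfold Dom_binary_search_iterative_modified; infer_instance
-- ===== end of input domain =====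

-- B replaces A's two-index while loop by a divide-and-conquer recursion on sublists (objective: alternative).
-- Both A and B insert `item` into `lst` in place when it is not found (same position); the equivalence proved here is about the RETURN value.

-- ===== PORT A =====
-- A's while loop over (start, end); indices stay in [0, lst.length), so lst[mid] is lst.getD mid 0 (always in range).
def bsLoopA (lst : List Int) (item : Int) (start e : Nat) : Nat :=
  if _h : start < e then
    let mid := (start + e) / 2
    let v := lst.getD mid 0
    if v = item then mid
    else if v > item then bsLoopA lst item start mid
    else bsLoopA lst item (mid + 1) e
  else e
termination_by e - start
decreasing_by all_goals omega

def binary_search_iterative_modified (lst : List Int) (item : Int) : Int :=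
  -- the final `lst.insert(end,item)` mutates the argument only; the returned value is `end`
  (bsLoopA lst item 0 lst.length : Int)

-- ===== PORT B =====
-- B's recursive helper on sublists: returns (relative index, found flag).
def bsRecB (item : Int) (sub : List Int) : Nat × Bool :=
  if _h : sub = [] then (0, false)
  else
    let m := sub.length / 2
    let v := sub.getD m 0
    if v = item then (m, true)
    else if v > item then bsRecB item (sub.take m)
    else
      let r := bsRecB item (sub.drop (m + 1))
      (m + 1 + r.1, r.2)
termination_by sub.length
decreasing_by
  · have : sub.length ≠ 0 := by simpa using _h
    simp; omega
  · have : sub.length ≠ 0 := by simpa using _h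
    simp; omega

def binary_search_iterative_modified_alt (lst : List Int) (item : Int) : Int :=
  -- when the flag is false, B inserts at the index (mutation only) and returns the index either way
  ((bsRecB item lst).1 : Int)

-- ===== PRECONDITION & SPEC =====
def Spec_binary_search_iterative_modified (lst : List Int) (item : Int) (out : Int) : Prop := out = binary_search_iterative_modified_alt lst item
instance (lst : List Int) (item : Int) (out : Int) : Decidable (Spec_binary_search_iterative_modified lst item out) := by unfold Spec_binary_search_iterative_modified; infer_instance

-- ===== CLAIM (what is proved, stated in full; the proofs are below) =====
def Claim_equal_binary_search_iterative_modified : Prop := ∀ (lst : List Int) (item : Int), Dom_binary_search_iterative_modified lst item → Spec_binary_search_iterative_modified lst item (binary_search_iterative_modified lst item)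

-- ===== LEMMAS AND PROOFS =====

lemma bsKey (lst : List Int) (item : Int) :
    ∀ n start e, e - start ≤ n → start ≤ e → e ≤ lst.length →
      bsLoopA lst item start e = start + (bsRecB item ((lst.drop start).take (e - start))).1 := by
  intro n
  induction n with
  | zero =>
    intro start e h1 h2 _
    have he : e = start := by omega
    subst he
    rw [bsLoopA, bsRecB]
    simp
  | succ n ih =>
    intro start e h1 h2 h3
    by_cases hlt : start < e
    · have hsub : (lst.drop start).take (e - start) ≠ [] := by
        have : ((lst.drop start).take (e - start)).length = e - start := by
          simp; omega
        intro hc; rw [hc] at this; simp at this; omega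
      have hlen : ((lst.drop start).take (e - start)).length = e - start := by
        simp; omega
      have hm : (e - start) / 2 = (start + e) / 2 - start := by omega
      have hmid : start + (e - start) / 2 = (start + e) / 2 := by omega
      have hmlt : (e - start) / 2 < e - start := by omega
      have hget : ((lst.drop start).take (e - start)).getD ((e - start) / 2) 0
          = lst.getD ((start + e) / 2) 0 := by
        simp [List.getD, hmlt, List.getElem?_drop, hmid]
      rw [bsLoopA, bsRecB]
      simp only [hlt, hsub, dif_pos, dif_neg, not_false_iff, hlen, hget]
      split
      · -- found
        simp; omega
      · split
        · -- go left: end := mid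
          have hrec := ih start ((start + e) / 2) (by omega) (by omega) (by omega)
          rw [hrec]
          have : ((lst.drop start).take (e - start)).take ((e - start) / 2)
              = (lst.drop start).take ((start + e) / 2 - start) := by
            rw [List.take_take]; congr 1; omega
          rw [this]
        · -- go right: start := mid + 1
          have hrec := ih ((start + e) / 2 + 1) e (by omega) (by omega) h3
          rw [hrec]
          have hd : ((lst.drop start).take (e - start)).drop ((e - start) / 2 + 1)
              = (lst.drop ((start + e) / 2 + 1)).take (e - ((start + e) / 2 + 1)) := by
            rw [List.drop_take, List.drop_drop]
            congr 1
            · omega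
            · congr 1; omega
          rw [hd]
          omega
    · have he : e = start := by omega
      subst he
      rw [bsLoopA, bsRecB]
      simp

-- ===== VERDICT (by name: the statement is the Claim_ definition above) =====
theorem binary_search_iterative_modified_spec : Claim_equal_binary_search_iterative_modified := by
  intro lst item _
  unfold Spec_binary_search_iterative_modified binary_search_iterative_modified binary_search_iterative_modified_alt
  have h := bsKey lst item lst.length 0 lst.length (by omega) (by omega) (le_refl _)
  simp at h
  rw [h]
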